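-- pv_equiv track=rewrite | github.com/spiyush1/visualizing-sorting-algorithms | mergesort.py | generate
-- ===== SOURCE A (Python) =====
-- def generate(lenlist,start1, end1, start2, end2):
-- 	colorArray = []
-- 	for i in range(lenlist):
-- 		colorArray.append('red')
-- 		if i>=start1 and i<=end1:
-- 			colorArray[i] = 'brown'
-- 		elif i>=start2 and i<= end2:
-- 			colorArray[i] = 'purple'
-- 	return colorArray
-- ===== SOURCE B (Python) =====
-- def generate(lenlist, start1, end1, start2, end2):
--     n = max(lenlist, 0)
--     colorArray = ['red'] * n
--     # purple range first, brown second, so brown overrides overlaps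
--     # (matching the if/elif precedence of the per-element version)
--     lo2, hi2 = max(start2, 0), min(end2, n - 1)
--     if lo2 <= hi2:
--         colorArray[lo2:hi2 + 1] = ['purple'] * (hi2 - lo2 + 1)
--     lo1, hi1 = max(start1, 0), min(end1, n - 1)
--     if lo1 <= hi1:
--         colorArray[lo1:hi1 + 1] = ['brown'] * (hi1 - lo1 + 1)
--     return colorArray
-- ===== Notes on version B (the rewrite author's own statement) =====
-- stated objective: faster
-- what changed: Replaces the per-index loop with a per-element two-range conditional by a whole-array fill plus two bulk slice assignments (purple first, then brown to preserve the elif precedence), with bounds clamped to [0, n-1].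
import Mathlib
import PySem

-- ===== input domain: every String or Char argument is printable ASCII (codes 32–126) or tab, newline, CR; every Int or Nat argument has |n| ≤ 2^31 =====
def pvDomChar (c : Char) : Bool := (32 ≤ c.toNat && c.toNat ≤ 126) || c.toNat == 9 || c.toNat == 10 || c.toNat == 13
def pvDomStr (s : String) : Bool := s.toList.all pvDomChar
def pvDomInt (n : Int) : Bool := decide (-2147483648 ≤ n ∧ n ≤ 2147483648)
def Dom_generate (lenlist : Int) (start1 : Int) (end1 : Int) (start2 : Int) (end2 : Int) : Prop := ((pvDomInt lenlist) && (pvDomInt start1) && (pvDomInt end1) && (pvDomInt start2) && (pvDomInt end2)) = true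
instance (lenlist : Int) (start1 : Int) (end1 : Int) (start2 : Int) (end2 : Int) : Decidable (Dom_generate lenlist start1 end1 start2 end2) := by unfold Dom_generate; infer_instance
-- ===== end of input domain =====

-- B replaces the per-index loop by a whole-array 'red' fill plus two bulk range writes
-- (purple first, then brown, preserving the elif precedence); objective: faster (constant factor).

-- ===== PORT A =====
-- literal port: append 'red', then overwrite slot i by 'brown'/'purple' per the if/elif
def generate (lenlist : Int) (start1 : Int) (end1 : Int) (start2 : Int) (end2 : Int) : List String :=
  (PySem.List.pyRange 0 lenlist 1).foldl (fun colorArray i =>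
    let colorArray := colorArray ++ ["red"]
    if i ≥ start1 ∧ i ≤ end1 then colorArray.set i.toNat "brown"
    else if i ≥ start2 ∧ i ≤ end2 then colorArray.set i.toNat "purple"
    else colorArray) []

-- ===== PORT B =====
-- colorArray[lo:hi+1] = [c] * (hi-lo+1)  (0 ≤ lo ≤ hi < length, so plain take/replicate/drop)
def sliceSet (xs : List String) (lo hi : Nat) (c : String) : List String :=
  xs.take lo ++ List.replicate (hi - lo + 1) c ++ xs.drop (hi + 1)

def generate_alt (lenlist : Int) (start1 : Int) (end1 : Int) (start2 : Int) (end2 : Int) : List String :=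
  let n := max lenlist 0
  let colorArray := List.replicate n.toNat "red"
  let lo2 := max start2 0
  let hi2 := min end2 (n - 1)
  let colorArray := if lo2 ≤ hi2 then sliceSet colorArray lo2.toNat hi2.toNat "purple" else colorArray
  let lo1 := max start1 0
  let hi1 := min end1 (n - 1)
  if lo1 ≤ hi1 then sliceSet colorArray lo1.toNat hi1.toNat "brown" else colorArray

-- ===== PRECONDITION & SPEC =====
def Spec_generate (lenlist : Int) (start1 : Int) (end1 : Int) (start2 : Int) (end2 : Int) (out : List String) : Prop := out = generate_alt lenlist start1 end1 start2 end2
instance (lenlist : Int) (start1 : Int) (end1 : Int) (start2 : Int) (end2 : Int) (out : List String) : Decidable (Spec_generate lenlist start1 end1 start2 end2 out) := by unfold Spec_generate; infer_instance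

-- ===== CLAIM (what is proved, stated in full; the proofs are below) =====
def Claim_equal_generate : Prop := ∀ (lenlist : Int) (start1 : Int) (end1 : Int) (start2 : Int) (end2 : Int), Dom_generate lenlist start1 end1 start2 end2 → Spec_generate lenlist start1 end1 start2 end2 (generate lenlist start1 end1 start2 end2)

-- ===== LEMMAS AND PROOFS =====

-- the common description: element i of the output
def colorOf (start1 end1 start2 end2 : Int) (i : Nat) : String :=
  if start1 ≤ (i : Int) ∧ (i : Int) ≤ end1 then "brown"
  else if start2 ≤ (i : Int) ∧ (i : Int) ≤ end2 then "purple"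
  else "red"

-- last-slot overwrite
theorem set_last (l : List String) (a c : String) :
    (l ++ [a]).set l.length c = l ++ [c] := by
  rw [List.set_append_right _ _ (le_refl _)]
  simp

-- A's loop builds the map over range
theorem generate_eq_map (lenlist start1 end1 start2 end2 : Int) :
    generate lenlist start1 end1 start2 end2 =
      (List.range lenlist.toNat).map (colorOf start1 end1 start2 end2) := by
  unfold generate
  rw [PySem.List.pyRange_one]
  simp only [sub_zero, zero_add]
  induction lenlist.toNat with
  | zero => simp
  | succ N ih =>
    rw [List.range_succ]
    simp only [List.map_append, List.foldl_append, ih, List.map_cons, List.map_nil,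
      List.foldl_cons, List.foldl_nil, ge_iff_le]
    have hset : ∀ c : String,
        (((List.range N).map (colorOf start1 end1 start2 end2)) ++ ["red"]).set
            ((N : Int)).toNat c =
          ((List.range N).map (colorOf start1 end1 start2 end2)) ++ [c] := by
      intro c
      have h := set_last ((List.range N).map (colorOf start1 end1 start2 end2)) "red" c
      rw [List.length_map, List.length_range] at h
      rw [Int.toNat_natCast]
      exact h
    conv_rhs => rw [show colorOf start1 end1 start2 end2 N =
      (if start1 ≤ (N : Int) ∧ (N : Int) ≤ end1 then "brown"
       else if start2 ≤ (N : Int) ∧ (N : Int) ≤ end2 then "purple" else "red") from rfl]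
    split_ifs with hA hB
    · exact hset "brown"
    · exact hset "purple"
    · rfl

-- bulk range write on a mapped range
theorem sliceSet_map_range (n lo hi : Nat) (f : Nat → String) (c : String)
    (hlo : lo ≤ hi) (hhi : hi < n) :
    sliceSet ((List.range n).map f) lo hi c =
      (List.range n).map (fun i => if lo ≤ i ∧ i ≤ hi then c else f i) := by
  unfold sliceSet
  apply List.ext_getElem
  · simp
    omega
  · intro i h1 h2
    simp only [List.getElem_map, List.getElem_range]
    rcases lt_or_ge i lo with hc1 | hc1
    · rw [List.getElem_append_left (by simp; omega),
        List.getElem_append_left (by simp; omega), List.getElem_take,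
        List.getElem_map, List.getElem_range, if_neg (by omega)]
    · rcases Nat.lt_or_ge hi i with hc2 | hc2
      · rw [List.getElem_append_right (by simp; omega)]
        simp only [List.getElem_drop, List.getElem_map, List.getElem_range,
          List.length_append, List.length_take, List.length_map, List.length_range,
          List.length_replicate]
        rw [if_neg (by omega)]
        congr 1
        omega
      · rw [List.getElem_append_left (by simp; omega),
          List.getElem_append_right (by simp; omega), List.getElem_replicate,
          if_pos (by omega)]

theorem generate_alt_eq_map (lenlist start1 end1 start2 end2 : Int) :
    generate_alt lenlist start1 end1 start2 end2 =
      (List.range lenlist.toNat).map (colorOf start1 end1 start2 end2) := by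
  have hn : (max lenlist 0).toNat = lenlist.toNat := by omega
  have hrepl : List.replicate lenlist.toNat "red" =
      (List.range lenlist.toNat).map (fun _ => "red") := by
    rw [List.map_const']
    simp
  simp only [generate_alt, hn, hrepl]
  set n := lenlist.toNat with hndef
  by_cases h2 : max start2 0 ≤ min end2 (max lenlist 0 - 1) <;>
    by_cases h1 : max start1 0 ≤ min end1 (max lenlist 0 - 1) <;>
    simp only [h1, h2, if_true, if_false] <;>
    [skip; skip; skip; skip] <;>
    first
    | (rw [sliceSet_map_range n _ _ _ _ (by omega) (by omega),
         sliceSet_map_range n _ _ _ _ (by omega) (by omega)]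
       apply List.map_congr_left
       intro i hi
       rw [List.mem_range] at hi
       unfold colorOf
       split_ifs <;> first | rfl | omega)
    | (rw [sliceSet_map_range n _ _ _ _ (by omega) (by omega)]
       apply List.map_congr_left
       intro i hi
       rw [List.mem_range] at hi
       unfold colorOf
       split_ifs <;> first | rfl | omega)
    | (apply List.map_congr_left
       intro i hi
       rw [List.mem_range] at hi
       unfold colorOf
       split_ifs <;> first | rfl | omega)

-- ===== VERDICT (by name: the statement is the Claim_ definition above) =====
theorem generate_spec : Claim_equal_generate := by
  intro lenlist start1 end1 start2 end2 _
  unfold Spec_generate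
  rw [generate_eq_map, generate_alt_eq_map]
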